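-- pv_equiv track=rewrite | github.com/collinleiber/LMU_Master_Practical_SoSe24 | practical/ProcessMining/group1/task3/inductiveminer_infrequent.py | _calculate_eventually_follows_graph
-- ===== SOURCE A (Python) =====
-- from collections import defaultdict
-- from typing import Optional, List, Tuple, Dict, Set
--
-- def _calculate_eventually_follows_graph(log: List[Tuple[str]]) -> Dict[Tuple[str, str], int]:
--     """
--     From a given sublog, an eventually follows graph is created covering not only directly follows pairs
--     but all transitive related follows pairs. Used for the filtered sequence cut.
--
--     Parameters:
--         log: sublog as subset of the original event log
--     """
--     efg = defaultdict(int)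
--
--     for trace in log:
--         for first in range(len(trace) - 1):
--             for second in range(first + 1, len(trace)):
--                 pair = (trace[first], trace[second])
--                 efg[pair] += 1
--
--     return efg
-- ===== SOURCE B (Python) =====
-- from collections import defaultdict
-- from typing import Optional, List, Tuple, Dict, Set
--
--
-- def _calculate_eventually_follows_graph(log: List[Tuple[str]]) -> Dict[Tuple[str, str], int]:
--     """One backward pass per trace maintaining a suffix activity counter and the
--     distinct-suffix first-occurrence order; each position then adds the whole
--     suffix count of every distinct later activity at once."""
--     efg = defaultdict(int)
--
--     for trace in log:
--         cnt = {}      # activity -> multiplicity in the current suffix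
--         order = []    # distinct activities of the current suffix, first-occurrence order
--         emits = []    # per suffix (built back to front): [(activity, suffix count)]
--         for a in reversed(trace[1:]):
--             cnt[a] = cnt.get(a, 0) + 1
--             order = [a] + [y for y in order if y != a]
--             emits.append([(y, cnt[y]) for y in order])
--         for x, emit in zip(trace, reversed(emits)):
--             for y, c in emit:
--                 efg[(x, y)] += c
--
--     return efg
-- ===== Notes on version B (the rewrite author's own statement) =====
-- stated objective: alternative
-- what changed: Replaces the per-trace double index loop over all pairs by a single backward pass that maintains a suffix activity counter and the distinct-suffix first-occurrence order, then adds each distinct later activity's whole suffix count at once per position.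
import Mathlib
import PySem

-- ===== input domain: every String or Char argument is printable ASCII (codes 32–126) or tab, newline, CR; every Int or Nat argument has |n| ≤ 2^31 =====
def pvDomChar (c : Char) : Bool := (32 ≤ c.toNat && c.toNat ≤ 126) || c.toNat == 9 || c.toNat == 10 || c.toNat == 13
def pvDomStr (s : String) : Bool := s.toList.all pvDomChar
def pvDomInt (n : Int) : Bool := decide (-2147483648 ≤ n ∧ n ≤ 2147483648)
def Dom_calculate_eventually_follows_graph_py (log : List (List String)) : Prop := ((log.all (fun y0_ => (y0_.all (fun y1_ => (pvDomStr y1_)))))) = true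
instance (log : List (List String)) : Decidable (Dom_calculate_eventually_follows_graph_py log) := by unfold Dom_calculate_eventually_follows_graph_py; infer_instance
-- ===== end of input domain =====

-- B (alternative algorithm): instead of the per-trace double index loop over all pairs, one
-- backward pass maintains a suffix activity counter plus the distinct-suffix first-occurrence
-- order, and each position then adds each distinct later activity's whole suffix count at once.

-- ===== PORT A =====
-- trace[first] / trace[second]: indices produced by pyRange are always in range here,
-- so pyGetD with a dummy default is exact.
def calculate_eventually_follows_graph_py (log : List (List String)) : List (String × String × Int) :=
  (log.foldl (fun efg trace =>
      (PySem.List.pyRange 0 ((trace.length : Int) - 1)).foldl (fun efg first =>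
        (PySem.List.pyRange (first + 1) (trace.length : Int)).foldl (fun efg second =>
          efg.modify (PySem.List.pyGetD trace first "", PySem.List.pyGetD trace second "") 0 (· + 1)) efg) efg)
    (PySem.Dict.empty : PySem.Dict (String × String) Int)).items.map (fun p => (p.1.1, p.1.2, p.2))

-- ===== PORT B =====
-- cnt[y] in the emit comprehension: y comes from `order`, which only holds suffix
-- activities, all present in cnt, so getD with default 0 is exact.
def calculate_eventually_follows_graph_py_alt (log : List (List String)) : List (String × String × Int) :=
  (log.foldl (fun efg trace =>
      let st := ((trace.drop 1).reverse).foldl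
        (fun (st : PySem.Dict String Int × List String × List (List (String × Int))) a =>
          let cnt := st.1.insert a (st.1.getD a 0 + 1)
          let order := a :: st.2.1.filter (fun y => !(y == a))
          (cnt, order, st.2.2 ++ [order.map (fun y => (y, cnt.getD y 0))]))
        ((PySem.Dict.empty : PySem.Dict String Int), ([] : List String), ([] : List (List (String × Int))))
      (trace.zip st.2.2.reverse).foldl (fun efg p =>
        p.2.foldl (fun efg yc => efg.modify (p.1, yc.1) 0 (· + yc.2)) efg) efg)
    (PySem.Dict.empty : PySem.Dict (String × String) Int)).items.map (fun p => (p.1.1, p.1.2, p.2))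

-- ===== PRECONDITION & SPEC =====
def Spec_calculate_eventually_follows_graph_py (log : List (List String)) (out : List (String × String × Int)) : Prop := out = calculate_eventually_follows_graph_py_alt log
instance (log : List (List String)) (out : List (String × String × Int)) : Decidable (Spec_calculate_eventually_follows_graph_py log out) := by unfold Spec_calculate_eventually_follows_graph_py; infer_instance

-- ===== CLAIM (what is proved, stated in full; the proofs are below) =====
def Claim_equal_calculate_eventually_follows_graph_py : Prop := ∀ (log : List (List String)), Dom_calculate_eventually_follows_graph_py log → Spec_calculate_eventually_follows_graph_py log (calculate_eventually_follows_graph_py log)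

-- ===== LEMMAS AND PROOFS =====

def pvInc (x : String) (d : PySem.Dict (String × String) Int) (y : String) : PySem.Dict (String × String) Int :=
  d.modify (x, y) 0 (· + 1)

lemma pv_modify_merge (d : PySem.Dict (String × String) Int) (k : String × String) (f g : Int → Int) :
    (d.modify k 0 f).modify k 0 g = d.modify k 0 (fun v => g (f v)) := by
  simp [PySem.Dict.modify, PySem.Dict.insert_insert_self]


lemma pv_insert_getD_self (d : PySem.Dict (String × String) Int) (k : String × String)
    (hnd : d.keys.Nodup) (hc : d.contains k = true) : d.insert k (d.getD k 0) = d := by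
  apply PySem.Dict.ext
  rw [PySem.Dict.items_insert_of_contains d _ hc]
  conv_rhs => rw [← List.map_id d.items]
  apply List.map_congr_left
  intro p hp
  by_cases h : p.1 = k
  · have hpm : (k, p.2) ∈ d.items := by rw [← h]; exact hp
    have hv := PySem.Dict.getD_of_mem_items d hpm hnd 0
    have hpe : (k, p.2) = p := by rw [← h]
    simp [h, hv, hpe]
  · simp [h]

lemma pv_modify_comm (d : PySem.Dict (String × String) Int) {k k' : String × String}
    (hne : k ≠ k') (hck : d.contains k = true) (f g : Int → Int) :
    (d.modify k' 0 f).modify k 0 g = (d.modify k 0 g).modify k' 0 f := by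
  simp only [PySem.Dict.modify]
  rw [PySem.Dict.getD_insert, PySem.Dict.getD_insert]
  simp only [hne, Ne.symm hne, if_false]
  apply PySem.Dict.ext
  rcases Bool.eq_false_or_eq_true (d.contains k') with hk' | hk'
  case inl =>
    have hk2 : (d.insert k' (f (d.getD k' 0))).contains k = true := by
      rw [PySem.Dict.contains_insert]; simp [hck]
    have hk'2 : (d.insert k (g (d.getD k 0))).contains k' = true := by
      rw [PySem.Dict.contains_insert]; simp [hk']
    rw [PySem.Dict.items_insert_of_contains _ _ hk2, PySem.Dict.items_insert_of_contains _ _ hk',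
        PySem.Dict.items_insert_of_contains _ _ hk'2, PySem.Dict.items_insert_of_contains _ _ hck,
        List.map_map, List.map_map]
    apply List.map_congr_left
    intro p _
    by_cases h1 : p.1 = k <;> by_cases h2 : p.1 = k' <;>
      simp_all [Function.comp, Ne.symm hne]
  case inr =>
    have hk2 : (d.insert k' (f (d.getD k' 0))).contains k = true := by
      rw [PySem.Dict.contains_insert]; simp [hck]
    have hk'2 : (d.insert k (g (d.getD k 0))).contains k' = false := by
      rw [PySem.Dict.contains_insert]; simp [hk', Ne.symm hne]
    rw [PySem.Dict.items_insert_of_contains _ _ hk2, PySem.Dict.items_insert_of_not_contains _ _ hk',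
        PySem.Dict.items_insert_of_not_contains _ _ hk'2, PySem.Dict.items_insert_of_contains _ _ hck,
        List.map_append]
    congr 1
    simp [Ne.symm hne]

lemma pv_ofList_cons (a : String) (l : List String) :
    PySem.Set.ofList (a :: l) = a :: (PySem.Set.ofList l).filter (fun y => !(y == a)) := by
  have h1 : a :: l = [a] ++ l := rfl
  rw [h1, PySem.Set.ofList_append, PySem.Set.update_eq_append_filter]
  have h2 : PySem.Set.ofList [a] = [a] := rfl
  rw [h2]
  have h3 : ∀ y : String, (!PySem.Set.contains [a] y) = (!(y == a)) := by
    intro y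
    show (!List.contains [a] y) = _
    by_cases h : y = a
    · simp [h]
    · simp [h]
  simp only [List.filter_congr (fun y _ => h3 y)]
  rfl

lemma pv_ofList_filter_ne (a : String) (l : List String) :
    PySem.Set.ofList (l.filter (fun z => !(z == a))) = (PySem.Set.ofList l).filter (fun z => !(z == a)) := by
  induction l with
  | nil => rfl
  | cons b t ih =>
    by_cases hb : b = a
    · subst hb
      rw [pv_ofList_cons]
      simp only [List.filter_cons]
      simp only [BEq.rfl, Bool.not_true, Bool.false_eq_true, if_false]
      rw [ih, List.filter_filter]
      apply List.filter_congr
      intro z _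
      by_cases hz : z = b <;> simp [hz]
    · rw [pv_ofList_cons]
      simp only [List.filter_cons]
      have : (!(b == a)) = true := by simp [hb]
      simp only [this, if_true]
      rw [pv_ofList_cons, ih]
      congr 1
      rw [List.filter_filter, List.filter_filter]
      apply List.filter_congr
      intro z _
      by_cases h1 : z = a <;> by_cases h2 : z = b <;> simp [h1, h2, Bool.and_comm]

lemma pv_nodup_modify (d : PySem.Dict (String × String) Int) (k : String × String) (f : Int → Int)
    (hnd : d.keys.Nodup) : (d.modify k 0 f).keys.Nodup := by
  simpa [PySem.Dict.modify] using PySem.Dict.nodup_keys_insert d k _ hnd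

lemma pv_bubble (x y : String) : ∀ (t : List String) (d : PySem.Dict (String × String) Int),
    d.keys.Nodup → d.contains (x, y) = true →
    t.foldl (pvInc x) d
      = (t.filter (fun z => !(z == y))).foldl (pvInc x) (d.modify (x, y) 0 (· + (t.count y : Int))) := by
  intro t
  induction t with
  | nil =>
    intro d hnd hc
    simp only [List.foldl_nil, List.filter_nil, List.count_nil]
    have h0 : (fun v : Int => v + ((0 : Nat) : Int)) = (fun v => v + 0) := by norm_num
    show d = d.modify (x, y) 0 (fun v => v + ((0:Nat) : Int))
    rw [h0]
    show d = d.insert (x,y) ((d.getD (x,y) 0) + 0)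
    rw [Int.add_zero, pv_insert_getD_self d _ hnd hc]
  | cons z r ih =>
    intro d hnd hc
    by_cases hz : z = y
    · subst hz
      simp only [List.foldl_cons, List.filter_cons, BEq.rfl, Bool.not_true]
      have hstep : pvInc x d z = d.modify (x, z) 0 (· + 1) := rfl
      rw [hstep, ih _ (pv_nodup_modify d _ _ hnd) (by rw [PySem.Dict.contains_modify]; simp [hc])]
      rw [pv_modify_merge]
      have hfe : (fun v : Int => v + 1 + (r.count z : Int)) = (fun v : Int => v + ((z :: r).count z : Int)) := by
        funext v; rw [List.count_cons]; simp; ring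
      rw [hfe]
      simp
    · have hzb : (!(z == y)) = true := by simp [hz]
      simp only [List.foldl_cons, List.filter_cons, hzb, if_true]
      have hstep : pvInc x d z = d.modify (x, z) 0 (· + 1) := rfl
      have hnd' := pv_nodup_modify d (x, z) (· + 1) hnd
      have hc' : (d.modify (x, z) 0 (· + 1)).contains (x, y) = true := by
        rw [PySem.Dict.contains_modify]; simp [hc]
      rw [hstep, ih _ hnd' hc']
      have hcnt : List.count y r = List.count y (z :: r) := by
        rw [List.count_cons]; simp [hz]
      rw [← hcnt]
      rw [pv_modify_comm _ (fun h => hz (Prod.ext_iff.mp h).2.symm) hc _ _]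
      rfl

lemma pv_nodup_inc (x : String) (s : List String) (d : PySem.Dict (String × String) Int)
    (hnd : d.keys.Nodup) : (s.foldl (pvInc x) d).keys.Nodup := by
  induction s generalizing d with
  | nil => exact hnd
  | cons a t ih => exact ih _ (pv_nodup_modify d _ _ hnd)

lemma pv_group (s : List String) (x : String) (d : PySem.Dict (String × String) Int) (hnd : d.keys.Nodup) :
    s.foldl (pvInc x) d
      = (PySem.Set.ofList s).foldl (fun d y => d.modify (x, y) 0 (· + (s.count y : Int))) d := by
  induction hn : s.length using Nat.strong_induction_on generalizing s d with
  | _ n ihn =>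
  match s with
  | [] => rfl
  | y :: t =>
    simp only [List.foldl_cons]
    have hstep : pvInc x d y = d.modify (x, y) 0 (· + 1) := rfl
    have hnd1 := pv_nodup_modify d (x, y) (· + 1) hnd
    have hc1 : (d.modify (x, y) 0 (· + 1)).contains (x, y) = true := by
      rw [PySem.Dict.contains_modify]; simp
    rw [hstep, pv_bubble x y t _ hnd1 hc1, pv_modify_merge]
    have hfe : (fun v : Int => v + 1 + (t.count y : Int)) = (fun v : Int => v + ((y :: t).count y : Int)) := by
      funext v; rw [List.count_cons]; simp; ring
    rw [hfe]
    set t' := t.filter (fun z => !(z == y)) with ht'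
    have hsn : t.length + 1 = n := by simpa using hn
    have hlt : t'.length < n := by
      have := List.length_filter_le (fun z => !(z == y)) t
      have h2 : t'.length ≤ t.length := by simpa [ht'] using this
      omega
    have hnd2 : (d.modify (x, y) 0 (· + ((y :: t).count y : Int))).keys.Nodup :=
      pv_nodup_modify d _ _ hnd
    rw [ihn t'.length hlt t' _ hnd2 rfl]
    rw [pv_ofList_cons, List.foldl_cons, ← pv_ofList_filter_ne]
    apply PySem.List.foldl_congr_mem
    intro acc z hz
    have hzt : z ∈ t' := (PySem.Set.mem_ofList _ _).mp hz
    have hzy : ¬ z = y := by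
      have := List.of_mem_filter hzt
      simpa using this
    have : t'.count z = (y :: t).count z := by
      rw [ht', List.count_filter (by simpa using hzy), List.count_cons]
      have : ¬ y = z := fun h => hzy h.symm
      simp [this]
    rw [this]

def pvEmit (l : List String) : List (String × Int) :=
  (PySem.Set.ofList l).map (fun y => (y, (l.count y : Int)))

def pvRevEmits : List String → List (List (String × Int))
  | [] => []
  | a :: l => pvEmit (a :: l) :: pvRevEmits l

def pvStep (st : PySem.Dict String Int × List String × List (List (String × Int))) (a : String) :
    PySem.Dict String Int × List String × List (List (String × Int)) :=
  let cnt := st.1.insert a (st.1.getD a 0 + 1)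
  let order := a :: st.2.1.filter (fun y => !(y == a))
  (cnt, order, st.2.2 ++ [order.map (fun y => (y, cnt.getD y 0))])

def pvPass (l : List String) : PySem.Dict String Int × List String × List (List (String × Int)) :=
  l.foldr (fun a st => pvStep st a) ((PySem.Dict.empty : PySem.Dict String Int), ([] : List String), ([] : List (List (String × Int))))

lemma pv_pass_spec (l : List String) :
    (∀ y, (pvPass l).1.getD y 0 = (l.count y : Int)) ∧
    (pvPass l).2.1 = PySem.Set.ofList l ∧
    (pvPass l).2.2.reverse = pvRevEmits l := by
  induction l with
  | nil =>
    refine ⟨fun y => ?_, rfl, rfl⟩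
    simp [pvPass, PySem.Dict.getD_empty]
  | cons a t ih =>
    obtain ⟨ihc, iho, ihe⟩ := ih
    have hstep : pvPass (a :: t) = pvStep (pvPass t) a := rfl
    have hcnt : ∀ y, (pvPass (a :: t)).1.getD y 0 = ((a :: t).count y : Int) := by
      intro y
      rw [hstep]
      show ((pvPass t).1.insert a ((pvPass t).1.getD a 0 + 1)).getD y 0 = _
      rw [PySem.Dict.getD_insert]
      by_cases h : y = a
      · subst h
        rw [if_pos rfl, ihc y, List.count_cons]
        simp
      · rw [if_neg h, ihc y, List.count_cons]
        have : ¬ a = y := fun hh => h hh.symm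
        simp [this]
    refine ⟨hcnt, ?_, ?_⟩
    · rw [hstep]
      show a :: (pvPass t).2.1.filter (fun y => !(y == a)) = _
      rw [iho, ← pv_ofList_cons]
    · rw [hstep]
      show ((pvPass t).2.2 ++ [(a :: (pvPass t).2.1.filter (fun y => !(y == a))).map (fun y => (y, ((pvPass t).1.insert a ((pvPass t).1.getD a 0 + 1)).getD y 0))]).reverse = _
      rw [List.reverse_append]
      simp only [List.reverse_cons, List.reverse_nil, List.nil_append, List.singleton_append]
      rw [ihe]
      show (_ :: pvRevEmits t) = pvEmit (a :: t) :: pvRevEmits t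
      congr 1
      have horder : a :: (pvPass t).2.1.filter (fun y => !(y == a)) = PySem.Set.ofList (a :: t) := by
        rw [iho, ← pv_ofList_cons]
      rw [horder]
      unfold pvEmit
      apply List.map_congr_left
      intro y hy
      congr 1
      exact hcnt y

def pvArec : List String → PySem.Dict (String × String) Int → PySem.Dict (String × String) Int
  | [], d => d
  | x :: s, d => pvArec s (s.foldl (pvInc x) d)

lemma pv_inner (u : List String) (x : String) : ∀ (k : Nat) (d : PySem.Dict (String × String) Int),
    (PySem.List.pyRange (k : Int) (u.length : Int)).foldl
        (fun d j => d.modify (x, PySem.List.pyGetD u j "") 0 (· + 1)) d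
      = (u.drop k).foldl (pvInc x) d := by
  intro k
  induction hfuel : u.length - k generalizing k with
  | zero =>
    intro d
    have hk : (u.length : Int) ≤ (k : Int) := by exact_mod_cast Nat.le_of_sub_eq_zero hfuel
    have hr : PySem.List.pyRange (k : Int) (u.length : Int) = [] := by
      simp [PySem.List.pyRange]
      omega
    rw [hr, List.drop_eq_nil_of_le (by omega)]
    rfl
  | succ n ih =>
    intro d
    have hk : k < u.length := by omega
    have hlt : (k : Int) < (u.length : Int) := by exact_mod_cast hk
    rw [PySem.List.pyRange_one_cons hlt, List.foldl_cons]
    rw [PySem.List.pyGetD_eq_getElem u "" (by positivity) (by exact_mod_cast hlt)]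
    rw [List.drop_eq_getElem_cons hk, List.foldl_cons]
    have hcast : ((k : Int) + 1) = ((k + 1 : Nat) : Int) := by push_cast; ring
    rw [hcast, ih (k + 1) (by omega)]
    rfl

lemma pv_outer (u : List String) : ∀ (k : Nat) (d : PySem.Dict (String × String) Int),
    (PySem.List.pyRange (k : Int) ((u.length : Int) - 1)).foldl
        (fun d first => (PySem.List.pyRange (first + 1) (u.length : Int)).foldl
          (fun d second => d.modify (PySem.List.pyGetD u first "", PySem.List.pyGetD u second "") 0 (· + 1)) d) d
      = pvArec (u.drop k) d := by
  intro k
  induction hfuel : u.length - k generalizing k with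
  | zero =>
    intro d
    have hr : PySem.List.pyRange (k : Int) ((u.length : Int) - 1) = [] := by
      simp [PySem.List.pyRange]
      omega
    rw [hr, List.drop_eq_nil_of_le (by omega)]
    rfl
  | succ n ih =>
    intro d
    by_cases hk : k + 1 < u.length
    · have hlt : (k : Int) < (u.length : Int) - 1 := by
        have : (k : Int) + 1 < (u.length : Int) := by exact_mod_cast hk
        omega
      rw [PySem.List.pyRange_one_cons hlt, List.foldl_cons]
      rw [PySem.List.pyGetD_eq_getElem u "" (by positivity) (by exact_mod_cast Nat.lt_of_succ_lt hk)]
      simp only [Int.toNat_natCast]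
      have hcast : ((k : Int) + 1) = ((k + 1 : Nat) : Int) := by push_cast; ring
      rw [hcast, pv_inner u (u[k]) (k + 1)]
      rw [ih (k + 1) (by omega)]
      rw [List.drop_eq_getElem_cons (Nat.lt_of_succ_lt hk)]
      rfl
    · have hr : PySem.List.pyRange (k : Int) ((u.length : Int) - 1) = [] := by
        simp [PySem.List.pyRange]
        omega
      rw [hr]
      -- u.drop k is [] or a singleton
      have hk2 : k < u.length := by omega
      have hk3 : u.length = k + 1 := by omega
      rw [List.drop_eq_getElem_cons hk2, List.drop_eq_nil_of_le (by omega)]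
      show d = pvArec [u[k]] d
      rfl

lemma pv_nodup_arec : ∀ (t : List String) (d : PySem.Dict (String × String) Int), d.keys.Nodup →
    (pvArec t d).keys.Nodup := by
  intro t
  induction t with
  | nil => exact fun d h => h
  | cons x s ih => exact fun d h => ih _ (pv_nodup_inc x s d h)

lemma pv_trace : ∀ (t : List String) (d : PySem.Dict (String × String) Int), d.keys.Nodup →
    (t.zip (pvRevEmits (t.drop 1))).foldl
        (fun efg p => p.2.foldl (fun efg yc => efg.modify (p.1, yc.1) 0 (· + yc.2)) efg) d
      = pvArec t d := by
  intro t
  induction t with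
  | nil => intro d _; rfl
  | cons x s ih =>
    intro d hnd
    match s, ih with
    | [], _ => rfl
    | a :: l, ih =>
      show ((x :: a :: l).zip (pvEmit (a :: l) :: pvRevEmits l)).foldl _ d = _
      rw [List.zip_cons_cons, List.foldl_cons]
      have hfirst : (pvEmit (a :: l)).foldl (fun efg yc => efg.modify (x, yc.1) 0 (· + yc.2)) d
          = (a :: l).foldl (pvInc x) d := by
        unfold pvEmit
        rw [List.foldl_map]
        exact (pv_group (a :: l) x d hnd).symm
      rw [hfirst]
      exact ih _ (pv_nodup_inc x (a :: l) d hnd)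

-- ===== VERDICT (by name: the statement is the Claim_ definition above) =====
theorem calculate_eventually_follows_graph_py_spec : Claim_equal_calculate_eventually_follows_graph_py := by
  intro log _
  unfold Spec_calculate_eventually_follows_graph_py
  unfold calculate_eventually_follows_graph_py calculate_eventually_follows_graph_py_alt
  have key : ∀ (lg : List (List String)) (d : PySem.Dict (String × String) Int), d.keys.Nodup →
      lg.foldl (fun efg trace =>
        (PySem.List.pyRange 0 ((trace.length : Int) - 1)).foldl (fun efg first =>
          (PySem.List.pyRange (first + 1) (trace.length : Int)).foldl (fun efg second =>
            efg.modify (PySem.List.pyGetD trace first "", PySem.List.pyGetD trace second "") 0 (· + 1)) efg) efg) d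
      = lg.foldl (fun efg trace =>
        let st := ((trace.drop 1).reverse).foldl
          (fun (st : PySem.Dict String Int × List String × List (List (String × Int))) a =>
            let cnt := st.1.insert a (st.1.getD a 0 + 1)
            let order := a :: st.2.1.filter (fun y => !(y == a))
            (cnt, order, st.2.2 ++ [order.map (fun y => (y, cnt.getD y 0))]))
          ((PySem.Dict.empty : PySem.Dict String Int), ([] : List String), ([] : List (List (String × Int))))
        (trace.zip st.2.2.reverse).foldl (fun efg p =>
          p.2.foldl (fun efg yc => efg.modify (p.1, yc.1) 0 (· + yc.2)) efg) efg) d := by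
    intro lg
    induction lg with
    | nil => intro d _; rfl
    | cons t rest ih =>
      intro d hnd
      rw [List.foldl_cons, List.foldl_cons]
      have hA : (PySem.List.pyRange 0 ((t.length : Int) - 1)).foldl (fun efg first =>
          (PySem.List.pyRange (first + 1) (t.length : Int)).foldl (fun efg second =>
            efg.modify (PySem.List.pyGetD t first "", PySem.List.pyGetD t second "") 0 (· + 1)) efg) d
          = pvArec t d := by
        have := pv_outer t 0 d
        simpa using this
      have hst : ((t.drop 1).reverse).foldl
          (fun (st : PySem.Dict String Int × List String × List (List (String × Int))) a =>
            let cnt := st.1.insert a (st.1.getD a 0 + 1)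
            let order := a :: st.2.1.filter (fun y => !(y == a))
            (cnt, order, st.2.2 ++ [order.map (fun y => (y, cnt.getD y 0))]))
          ((PySem.Dict.empty : PySem.Dict String Int), ([] : List String), ([] : List (List (String × Int))))
          = pvPass (t.drop 1) := by
        rw [List.foldl_reverse]
        rfl
      have hB : (t.zip ((pvPass (t.drop 1)).2.2.reverse)).foldl (fun efg p =>
          p.2.foldl (fun efg yc => efg.modify (p.1, yc.1) 0 (· + yc.2)) efg) d = pvArec t d := by
        rw [(pv_pass_spec (t.drop 1)).2.2]
        exact pv_trace t d hnd
      simp only [hst, hA, hB]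
      exact ih _ (pv_nodup_arec t d hnd)
  rw [key log PySem.Dict.empty (by simp [PySem.Dict.keys_empty])]
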